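-- pv_equiv track=rewrite | github.com/CrowdingFaun624/Advent-of-Code-2023 | Day 2/Day2.py | get_minimum_possible_cubes
-- ===== SOURCE A (Python) =====
-- def get_minimum_possible_cubes(games:dict[int,list[tuple[int,int,int]]]) -> dict[int,tuple[int,int,int]]:
--     '''Returns a dictionary: `{ID: (minimum_r, minimum_g, minimum_b)}`'''
--     output:dict[int,tuple[int,int,int]] = {}
--     for game_id, game_rounds in games.items():
--         minimum_cubes = [0] * 3
--         for round in game_rounds:
--             minimum_cubes = [max(current_minimum, this_rounds_cubes) for current_minimum, this_rounds_cubes in zip(minimum_cubes, round)]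
--         output[game_id] = tuple(minimum_cubes)
--     return output
-- ===== SOURCE B (Python) =====
-- def get_minimum_possible_cubes(games:dict[int,list[tuple[int,int,int]]]) -> dict[int,tuple[int,int,int]]:
--     '''Returns a dictionary: `{ID: (minimum_r, minimum_g, minimum_b)}`'''
--     return {
--         game_id: (
--             max([0] + [r[0] for r in rounds]),
--             max([0] + [r[1] for r in rounds]),
--             max([0] + [r[2] for r in rounds]),
--         )
--         for game_id, rounds in games.items()
--     }
-- ===== Notes on version B (the rewrite author's own statement) =====
-- stated objective: simpler
-- what changed: Replaces the row-wise running-accumulator fold (a 3-list rebuilt via zip on every round, then converted to a tuple) with a single dict comprehension that computes each color's maximum independently by a column-wise max over the rounds.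
import Mathlib
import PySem

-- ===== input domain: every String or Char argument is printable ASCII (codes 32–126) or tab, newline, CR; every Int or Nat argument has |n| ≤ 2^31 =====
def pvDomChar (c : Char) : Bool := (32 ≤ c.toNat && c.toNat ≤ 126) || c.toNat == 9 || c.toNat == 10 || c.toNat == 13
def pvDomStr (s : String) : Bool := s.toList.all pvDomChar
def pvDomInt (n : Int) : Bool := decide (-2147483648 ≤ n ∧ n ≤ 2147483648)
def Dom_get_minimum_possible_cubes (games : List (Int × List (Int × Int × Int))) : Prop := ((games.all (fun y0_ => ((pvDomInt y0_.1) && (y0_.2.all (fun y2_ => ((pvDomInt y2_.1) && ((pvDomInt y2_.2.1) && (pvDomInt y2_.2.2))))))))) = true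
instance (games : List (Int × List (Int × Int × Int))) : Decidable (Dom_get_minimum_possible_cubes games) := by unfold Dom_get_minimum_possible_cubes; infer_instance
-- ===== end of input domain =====

-- B replaces A's row-wise running-accumulator fold by three independent column-wise maxima
-- per game (objective: simpler).

-- ===== PORT A =====
-- minimum_cubes = [max(c, r) for c, r in zip(minimum_cubes, round)]  (round is a 3-tuple)
def pvStepA (mins : List Int) (rnd : Int × Int × Int) : List Int :=
  (mins.zip [rnd.1, rnd.2.1, rnd.2.2]).map (fun p => max p.1 p.2)

-- tuple(minimum_cubes): the inner list always has length 3 in A; other lengths are unreachable.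
def pvTuple3 (l : List Int) : Int × Int × Int :=
  match l with
  | [a, b, c] => (a, b, c)
  | _ => (0, 0, 0)

def get_minimum_possible_cubes (games : List (Int × List (Int × Int × Int))) : List (Int × Int × Int × Int) :=
  (games.foldl
    (fun (output : PySem.Dict Int (Int × Int × Int)) g =>
      output.insert g.1 (pvTuple3 (g.2.foldl pvStepA [0, 0, 0])))
    PySem.Dict.empty).items

-- ===== PORT B =====
-- max([0] + xs): Python's max of ints = left fold of max starting from 0.
def pvColMax (xs : List Int) : Int := xs.foldl max 0

def get_minimum_possible_cubes_alt (games : List (Int × List (Int × Int × Int))) : List (Int × Int × Int × Int) :=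
  games.map (fun g =>
    (g.1, pvColMax (g.2.map (·.1)), pvColMax (g.2.map (·.2.1)), pvColMax (g.2.map (·.2.2))))

-- ===== PRECONDITION & SPEC =====
-- Pre_ only requires the game ids to be distinct: the Python argument is a dict, whose keys
-- are necessarily distinct, so this excludes no input the Python function actually receives.
def Pre_get_minimum_possible_cubes (games : List (Int × List (Int × Int × Int))) : Prop :=
  (games.map Prod.fst).Nodup
instance (games : List (Int × List (Int × Int × Int))) : Decidable (Pre_get_minimum_possible_cubes games) := by unfold Pre_get_minimum_possible_cubes; infer_instance

def pvWitness_get_minimum_possible_cubes : (List (Int × List (Int × Int × Int))) :=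
  [(1, [(1, 2, 3), (4, 0, 2)]), (2, [])]

def Spec_get_minimum_possible_cubes (games : List (Int × List (Int × Int × Int))) (out : List (Int × Int × Int × Int)) : Prop := out = get_minimum_possible_cubes_alt games
instance (games : List (Int × List (Int × Int × Int))) (out : List (Int × Int × Int × Int)) : Decidable (Spec_get_minimum_possible_cubes games out) := by unfold Spec_get_minimum_possible_cubes; infer_instance

-- ===== CLAIM (what is proved, stated in full; the proofs are below) =====
def Claim_equal_get_minimum_possible_cubes : Prop := ∀ (games : List (Int × List (Int × Int × Int))), Dom_get_minimum_possible_cubes games → Pre_get_minimum_possible_cubes games → Spec_get_minimum_possible_cubes games (get_minimum_possible_cubes games)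

-- ===== LEMMAS AND PROOFS =====

-- A's inner accumulator fold computes the three column maxima.
theorem pv_inner (rs : List (Int × Int × Int)) (a b c : Int) :
    rs.foldl pvStepA [a, b, c] =
      [(rs.map (·.1)).foldl max a, (rs.map (·.2.1)).foldl max b, (rs.map (·.2.2)).foldl max c] := by
  induction rs generalizing a b c with
  | nil => rfl
  | cons r rs ih =>
    simp only [List.foldl_cons, List.map_cons]
    rw [show pvStepA [a, b, c] r = [max a r.1, max b r.2.1, max c r.2.2] from rfl]
    exact ih _ _ _

-- ===== VERDICT (by name: the statement is the Claim_ definition above) =====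
theorem get_minimum_possible_cubes_spec : Claim_equal_get_minimum_possible_cubes := by
  intro games _ hpre
  unfold Pre_get_minimum_possible_cubes at hpre
  unfold Spec_get_minimum_possible_cubes get_minimum_possible_cubes get_minimum_possible_cubes_alt
  rw [PySem.Dict.items_foldl_insert_fresh games Prod.fst
        (fun g => pvTuple3 (g.2.foldl pvStepA [0, 0, 0])) PySem.Dict.empty
        (fun a _ => PySem.Dict.contains_empty a.1) hpre]
  simp only [PySem.Dict.empty, List.nil_append]
  refine List.map_congr_left (fun g _ => ?_)
  rw [pv_inner]
  rfl
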